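-- pv_equiv track=rewrite | github.com/Victor-Grinan-Dev/some_corey_shaffer_lessons | random exercises from internet/solved_CodingBat _practice.py | no_teen_sum
-- ===== SOURCE A (Python) =====
-- def no_teen_sum(a, b, c):
--     from functools import reduce
--     ages = [a, b, c]
--     for age in ages:
--         if age in range(13, 20):
--             index = ages.index(age)
--             ages[index] = fix_teen(age)
--     return reduce(lambda x, y: x + y, ages)
--
-- def fix_teen(n):
--     if n == 15 or n == 16:
--         return n
--     return 0
-- ===== SOURCE B (Python) =====
-- def no_teen_sum(a, b, c):
--     total = a + b + c
--     for v in (a, b, c):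
--         if v in range(13, 20) and v not in (15, 16):
--             total -= v
--     return total
-- ===== Notes on version B (the rewrite author's own statement) =====
-- stated objective: simpler
-- what changed: B sums all three ages up front and subtracts each disallowed teen value in one pass, replacing A's list-building, list.index re-scan, element mutation and reduce.
import Mathlib
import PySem

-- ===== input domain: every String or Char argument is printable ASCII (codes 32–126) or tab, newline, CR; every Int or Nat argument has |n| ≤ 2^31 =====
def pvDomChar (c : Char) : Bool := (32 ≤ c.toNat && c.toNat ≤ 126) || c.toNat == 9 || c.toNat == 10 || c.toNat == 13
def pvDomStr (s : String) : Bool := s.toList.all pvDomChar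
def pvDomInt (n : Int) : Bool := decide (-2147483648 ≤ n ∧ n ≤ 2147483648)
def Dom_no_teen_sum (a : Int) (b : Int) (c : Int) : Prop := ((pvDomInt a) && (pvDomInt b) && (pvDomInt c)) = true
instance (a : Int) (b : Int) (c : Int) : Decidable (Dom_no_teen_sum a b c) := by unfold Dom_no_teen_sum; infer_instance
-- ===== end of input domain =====

-- B sums the three ages up front and subtracts each disallowed teen in one pass,
-- replacing A's build-list / list.index re-scan / in-place mutation / reduce shape (objective: simpler).

-- ===== PORT A =====
def fix_teen (n : Int) : Int := if n = 15 ∨ n = 16 then n else 0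

-- body of Python's `for age in ages` loop: at step i it reads ages[i] from the
-- (possibly already mutated) list, exactly as CPython's list iterator does
def nts_step (ages : List Int) (i : Nat) : List Int :=
  let age := ages.getD i 0
  if 13 ≤ age ∧ age < 20 then          -- `age in range(13, 20)`
    match PySem.List.index? ages age with
    | some idx => ages.set idx (fix_teen age)
    | none => ages                      -- unreachable: age was read from ages
  else ages

def no_teen_sum (a : Int) (b : Int) (c : Int) : Int :=
  let ages : List Int := [a, b, c]
  let ages := (List.range ages.length).foldl nts_step ages
  match ages with                       -- reduce(lambda x, y: x + y, ages)
  | [] => 0                             -- unreachable: ages has 3 elements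
  | x :: xs => xs.foldl (fun x y => x + y) x

-- ===== PORT B =====
def no_teen_sum_alt (a : Int) (b : Int) (c : Int) : Int :=
  let total := a + b + c
  [a, b, c].foldl (fun total v =>
    if (13 ≤ v ∧ v < 20) ∧ ¬(v = 15 ∨ v = 16) then total - v else total) total

-- ===== PRECONDITION & SPEC =====
def Spec_no_teen_sum (a : Int) (b : Int) (c : Int) (out : Int) : Prop := out = no_teen_sum_alt a b c
instance (a : Int) (b : Int) (c : Int) (out : Int) : Decidable (Spec_no_teen_sum a b c out) := by unfold Spec_no_teen_sum; infer_instance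

-- ===== CLAIM (what is proved, stated in full; the proofs are below) =====
def Claim_equal_no_teen_sum : Prop := ∀ (a : Int) (b : Int) (c : Int), Dom_no_teen_sum a b c → Spec_no_teen_sum a b c (no_teen_sum a b c)

-- ===== LEMMAS AND PROOFS =====

-- value left at a position once its loop step has run
def A1 (n : Int) : Int := if 13 ≤ n ∧ n < 20 then fix_teen n else n

-- Step 0 fixes position 0 (index finds the first occurrence, which is 0 itself).
theorem step0 (a b c : Int) : nts_step [a, b, c] 0 = [A1 a, b, c] := by
  simp only [nts_step, List.getD, List.getElem?_cons_zero, Option.getD_some, A1]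
  split_ifs with h
  · simp [PySem.List.index?_eq_idxOf?, List.idxOf?, List.findIdx?, List.findIdx?.go]
  · rfl

-- Step 1 reads b; even when index finds position 0 (A1 a = b), the result list is
-- [A1 a, A1 b, c]: a teen equal to A1 a must be 15 or 16, which fix_teen keeps.
theorem step1 (a b c : Int) : nts_step [A1 a, b, c] 1 = [A1 a, A1 b, c] := by
  simp only [nts_step, List.getD, List.getElem?_cons_succ, List.getElem?_cons_zero,
    Option.getD_some]
  split_ifs with h
  · simp only [PySem.List.index?_eq_idxOf?, List.idxOf?, List.findIdx?, List.findIdx?.go,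
      beq_iff_eq]
    split_ifs with h2 <;>
    · simp only [List.set, List.cons.injEq]
      unfold A1 fix_teen at *
      split_ifs at * <;> simp_all
  · simp only [A1, fix_teen]
    split_ifs at * <;> simp_all

-- Step 2 reads c; same argument for the two earlier positions.
theorem step2 (a b c : Int) : nts_step [A1 a, A1 b, c] 2 = [A1 a, A1 b, A1 c] := by
  simp only [nts_step, List.getD, List.getElem?_cons_succ, List.getElem?_cons_zero,
    Option.getD_some]
  split_ifs with h
  · simp only [PySem.List.index?_eq_idxOf?, List.idxOf?, List.findIdx?, List.findIdx?.go,
      beq_iff_eq]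
    split_ifs with h2 h3 <;>
    · simp only [List.set, List.cons.injEq]
      unfold A1 fix_teen at *
      split_ifs at * <;> simp_all
  · simp only [A1, fix_teen]
    split_ifs at * <;> simp_all

-- A's per-value result written with B's single combined test
theorem A1_eq (v : Int) :
    A1 v = if (13 ≤ v ∧ v < 20) ∧ ¬(v = 15 ∨ v = 16) then 0 else v := by
  unfold A1 fix_teen; split_ifs <;> omega

theorem arith (a b c : Int) : A1 a + A1 b + A1 c = no_teen_sum_alt a b c := by
  unfold no_teen_sum_alt
  simp only [List.foldl_cons, List.foldl_nil, A1_eq]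
  split_ifs <;> omega

-- ===== VERDICT (by name: the statement is the Claim_ definition above) =====
theorem no_teen_sum_spec : Claim_equal_no_teen_sum := by
  intro a b c _
  unfold Spec_no_teen_sum no_teen_sum
  simp only [List.length_cons, List.length_nil]
  rw [(by decide : List.range 3 = [0, 1, 2])]
  simp only [List.foldl_cons, List.foldl_nil]
  rw [step0, step1, step2]
  show List.foldl (fun x y => x + y) (A1 a) [A1 b, A1 c] = no_teen_sum_alt a b c
  simp only [List.foldl_cons, List.foldl_nil]
  exact arith a b c
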